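-- pv_equiv track=rewrite | github.com/kiayi129/FYP-Airline-NLP | Final_Year_Project.py | map_aspect_to_health
-- ===== SOURCE A (Python) =====
-- def map_aspect_to_health(aspect_sentiment):
--
--     """Map aspect sentiment to relevant health categories with sentence extraction."""
--     health_impact_mapping = {
--         'service_and_staff': 'emotional_health',
--         'flight_experience': 'mental_health',
--         'food_and_drink': 'dietary_health',
--         'seat_comfort': 'physical_body_health',
--     }
--
--     # Define default result when no aspect is detected
--     default_result = {
--         'emotional_health': {'impact': 'neutral', 'emotion': 'neutral', 'sentence': ''},
--         'mental_health': {'impact': 'neutral', 'emotion': 'neutral', 'sentence': ''},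
--         'dietary_health': {'impact': 'neutral', 'emotion': 'neutral', 'sentence': ''},
--         'physical_body_health': {'impact': 'neutral', 'emotion': 'neutral', 'sentence': ''},
--     }
--
--     health_results = default_result.copy()
--
--     for aspect, data in aspect_sentiment.items():
--         # Check if the aspect exists in the mapping
--         if aspect in health_impact_mapping:
--             category = health_impact_mapping[aspect]
--             sentiment = data['sentiment']
--             emotion = data['emotion']
--             sentence = data['sentence']
--
--             # Determine impact based on sentiment
--             impact = 'positive' if sentiment == 'positive' else 'negative' if sentiment == 'negative' else 'neutral'
--
--             # Update the health category with relevant data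
--             health_results[category] = {
--                 'impact': impact,
--                 'emotion': emotion,
--                 'sentence': sentence
--             }
--
--     # Flatten results to maintain one row per review
--     flattened_results = []
--     for category, result in health_results.items():
--         flattened_results.append({
--             'health_category': category,
--             'impact': result['impact'],
--             'emotion': result['emotion'],
--             'sentence': result['sentence']
--         })
--
--     return flattened_results
-- ===== SOURCE B (Python) =====
-- def map_aspect_to_health(aspect_sentiment):
--     """Category-driven single pass: emit one row per health category in canonical
--     order, looking up the source aspect directly; no intermediate results dict."""
--     categories = (
--         ('emotional_health', 'service_and_staff'),
--         ('mental_health', 'flight_experience'),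
--         ('dietary_health', 'food_and_drink'),
--         ('physical_body_health', 'seat_comfort'),
--     )
--     rows = []
--     for category, aspect in categories:
--         data = aspect_sentiment.get(aspect)
--         if data is None:
--             rows.append({'health_category': category, 'impact': 'neutral',
--                          'emotion': 'neutral', 'sentence': ''})
--         else:
--             sentiment = data['sentiment']
--             impact = sentiment if sentiment in ('positive', 'negative') else 'neutral'
--             rows.append({'health_category': category, 'impact': impact,
--                          'emotion': data['emotion'], 'sentence': data['sentence']})
--     return rows
-- ===== Notes on version B (the rewrite author's own statement) =====
-- stated objective: simpler
-- what changed: B drives one loop over the four output health categories (reverse mapping category->aspect) and looks each aspect up directly, instead of A's two passes that first fold the input dict into an intermediate health_results dict and then flatten it.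
import Mathlib
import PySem

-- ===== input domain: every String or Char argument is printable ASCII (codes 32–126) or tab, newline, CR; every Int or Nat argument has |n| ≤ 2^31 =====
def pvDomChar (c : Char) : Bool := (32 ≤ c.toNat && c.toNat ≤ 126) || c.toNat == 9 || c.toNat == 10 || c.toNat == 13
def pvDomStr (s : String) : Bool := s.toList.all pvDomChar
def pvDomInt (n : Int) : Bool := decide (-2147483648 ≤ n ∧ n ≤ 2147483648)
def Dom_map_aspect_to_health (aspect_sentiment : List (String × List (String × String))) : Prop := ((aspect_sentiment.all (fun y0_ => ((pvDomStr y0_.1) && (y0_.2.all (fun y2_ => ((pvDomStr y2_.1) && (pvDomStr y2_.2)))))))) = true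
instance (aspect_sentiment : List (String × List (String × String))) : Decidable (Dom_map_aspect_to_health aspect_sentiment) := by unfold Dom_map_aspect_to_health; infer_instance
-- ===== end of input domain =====

-- B replaces A's two passes (fold into an intermediate health_results dict, then flatten)
-- by a single loop over the four output categories with a direct aspect lookup: simpler.

-- ===== PORT A =====
def pvMappingA : PySem.Dict String String := PySem.Dict.mk
  [("service_and_staff", "emotional_health"),
   ("flight_experience", "mental_health"),
   ("food_and_drink", "dietary_health"),
   ("seat_comfort", "physical_body_health")]

def pvDefaultResultA : PySem.Dict String (List (String × String)) := PySem.Dict.mk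
  [("emotional_health", [("impact", "neutral"), ("emotion", "neutral"), ("sentence", "")]),
   ("mental_health", [("impact", "neutral"), ("emotion", "neutral"), ("sentence", "")]),
   ("dietary_health", [("impact", "neutral"), ("emotion", "neutral"), ("sentence", "")]),
   ("physical_body_health", [("impact", "neutral"), ("emotion", "neutral"), ("sentence", "")])]

-- loop body of A's first pass (the 'for aspect, data in aspect_sentiment.items()' loop)
def pvStepA (hr : PySem.Dict String (List (String × String)))
    (p : String × List (String × String)) : PySem.Dict String (List (String × String)) :=
  match pvMappingA.get? p.1 with
  | some category =>
    let data := PySem.Dict.mk p.2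
    match data.get? "sentiment", data.get? "emotion", data.get? "sentence" with
    | some sentiment, some emotion, some sentence =>
      let impact := if sentiment == "positive" then "positive"
                    else if sentiment == "negative" then "negative" else "neutral"
      hr.insert category [("impact", impact), ("emotion", emotion), ("sentence", sentence)]
    | _, _, _ => hr      -- Python raises KeyError here; excluded by Pre_
  | none => hr

def map_aspect_to_health (aspect_sentiment : List (String × List (String × String))) : List (List (String × String)) :=
  let health_results := aspect_sentiment.foldl pvStepA pvDefaultResultA
  health_results.items.foldl (fun acc p =>
    let result := PySem.Dict.mk p.2
    acc ++ [[("health_category", p.1),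
             ("impact", result.getD "impact" ""),
             ("emotion", result.getD "emotion" ""),
             ("sentence", result.getD "sentence" "")]]) []

-- ===== PORT B =====
def pvCategoriesB : List (String × String) :=
  [("emotional_health", "service_and_staff"),
   ("mental_health", "flight_experience"),
   ("dietary_health", "food_and_drink"),
   ("physical_body_health", "seat_comfort")]

def map_aspect_to_health_alt (aspect_sentiment : List (String × List (String × String))) : List (List (String × String)) :=
  let d := PySem.Dict.mk aspect_sentiment
  pvCategoriesB.map (fun ca =>
    match d.get? ca.2 with
    | none =>
      [("health_category", ca.1), ("impact", "neutral"), ("emotion", "neutral"), ("sentence", "")]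
    | some data =>
      let dd := PySem.Dict.mk data
      match dd.get? "sentiment", dd.get? "emotion", dd.get? "sentence" with
      | some sentiment, some emotion, some sentence =>
        let impact := if sentiment == "positive" || sentiment == "negative" then sentiment else "neutral"
        [("health_category", ca.1), ("impact", impact), ("emotion", emotion), ("sentence", sentence)]
      | _, _, _ => [("health_category", ca.1)])   -- Python raises KeyError here; excluded by Pre_

-- ===== PRECONDITION & SPEC =====
-- Pre_ excludes (a) association lists with duplicate aspect keys — not representable as a
-- Python dict input, and the ports' first-match vs overwrite readings of such a list are both
-- accidental — and (b) inputs where a mapped aspect's data lacks one of the keys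
-- 'sentiment'/'emotion'/'sentence', on which both Pythons raise KeyError.
def Pre_map_aspect_to_health (aspect_sentiment : List (String × List (String × String))) : Prop :=
  (aspect_sentiment.map Prod.fst).Nodup ∧
  ∀ p ∈ aspect_sentiment,
    (p.1 = "service_and_staff" ∨ p.1 = "flight_experience" ∨ p.1 = "food_and_drink" ∨ p.1 = "seat_comfort") →
    (((PySem.Dict.mk p.2).get? "sentiment").isSome ∧
     ((PySem.Dict.mk p.2).get? "emotion").isSome ∧
     ((PySem.Dict.mk p.2).get? "sentence").isSome)
instance (aspect_sentiment : List (String × List (String × String))) : Decidable (Pre_map_aspect_to_health aspect_sentiment) := by unfold Pre_map_aspect_to_health; infer_instance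

def pvWitness_map_aspect_to_health : (List (String × List (String × String))) :=
  [("seat_comfort", [("sentiment", "negative"), ("emotion", "anger"), ("sentence", "bad seat")])]

def Spec_map_aspect_to_health (aspect_sentiment : List (String × List (String × String))) (out : List (List (String × String))) : Prop := out = map_aspect_to_health_alt aspect_sentiment
instance (aspect_sentiment : List (String × List (String × String))) (out : List (List (String × String))) : Decidable (Spec_map_aspect_to_health aspect_sentiment out) := by unfold Spec_map_aspect_to_health; infer_instance

-- ===== CLAIM (what is proved, stated in full; the proofs are below) =====
def Claim_equal_map_aspect_to_health : Prop := ∀ (aspect_sentiment : List (String × List (String × String))), Dom_map_aspect_to_health aspect_sentiment → Pre_map_aspect_to_health aspect_sentiment → Spec_map_aspect_to_health aspect_sentiment (map_aspect_to_health aspect_sentiment)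

-- ===== LEMMAS AND PROOFS =====

-- the row A stores for a mapped aspect with data d (total form, via getD)
def pvRow (d : List (String × String)) : List (String × String) :=
  let dd := PySem.Dict.mk d
  let s := dd.getD "sentiment" ""
  [("impact", if s == "positive" || s == "negative" then s else "neutral"),
   ("emotion", dd.getD "emotion" ""), ("sentence", dd.getD "sentence" "")]

-- value of the category sourced from aspect a after A's fold, given its pre-fold value w
def pvSel (as : List (String × List (String × String))) (a : String) (w : List (String × String)) : List (String × String) :=
  match (PySem.Dict.mk as).get? a with
  | some d => pvRow d
  | none => w

theorem pvStepA_mapped (hr : PySem.Dict String (List (String × String)))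
    (a c : String) (d : List (String × String))
    (hm : pvMappingA.get? a = some c)
    (hs : (((PySem.Dict.mk d).get? "sentiment")).isSome)
    (he : (((PySem.Dict.mk d).get? "emotion")).isSome)
    (hz : (((PySem.Dict.mk d).get? "sentence")).isSome) :
    pvStepA hr (a, d) = hr.insert c (pvRow d) := by
  obtain ⟨s, hs⟩ := Option.isSome_iff_exists.mp hs
  obtain ⟨e, he⟩ := Option.isSome_iff_exists.mp he
  obtain ⟨z, hz⟩ := Option.isSome_iff_exists.mp hz
  simp only [pvStepA, hm, hs, he, hz, pvRow, PySem.Dict.getD_eq_get?_getD,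
    Option.getD_some]
  by_cases hsp : s = "positive" <;> by_cases hsn : s = "negative" <;>
    simp [hsp, hsn]

theorem pvFold_char (as : List (String × List (String × String)))
    (hnd : (as.map Prod.fst).Nodup)
    (hpre : ∀ p ∈ as,
      (p.1 = "service_and_staff" ∨ p.1 = "flight_experience" ∨ p.1 = "food_and_drink" ∨ p.1 = "seat_comfort") →
      (((PySem.Dict.mk p.2).get? "sentiment").isSome ∧
       ((PySem.Dict.mk p.2).get? "emotion").isSome ∧
       ((PySem.Dict.mk p.2).get? "sentence").isSome))
    (w1 w2 w3 w4 : List (String × String)) :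
    as.foldl pvStepA (PySem.Dict.mk
      [("emotional_health", w1), ("mental_health", w2), ("dietary_health", w3), ("physical_body_health", w4)]) =
    PySem.Dict.mk
      [("emotional_health", pvSel as "service_and_staff" w1),
       ("mental_health", pvSel as "flight_experience" w2),
       ("dietary_health", pvSel as "food_and_drink" w3),
       ("physical_body_health", pvSel as "seat_comfort" w4)] := by
  induction as generalizing w1 w2 w3 w4 with
  | nil => simp [pvSel, PySem.Dict.get?]
  | cons p t ih =>
    obtain ⟨a, d⟩ := p
    rw [List.map_cons, List.nodup_cons] at hnd
    obtain ⟨hna, hnd'⟩ := hnd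
    have hpre' := fun q hq => hpre q (List.mem_cons_of_mem _ hq)
    have hnone : ∀ x : String, x = a → (PySem.Dict.mk t).get? x = none := by
      intro x hx
      rw [PySem.Dict.get?_eq_none_iff_not_mem_keys]
      simpa [hx] using hna
    simp only [List.foldl_cons]
    by_cases h1 : a = "service_and_staff"
    · subst h1
      obtain ⟨hs, he, hz⟩ := hpre _ (List.mem_cons_self) (Or.inl rfl)
      rw [pvStepA_mapped _ _ _ _ rfl hs he hz]
      rw [show (PySem.Dict.mk
          [("emotional_health", w1), ("mental_health", w2), ("dietary_health", w3),
           ("physical_body_health", w4)]).insert "emotional_health" (pvRow d) = PySem.Dict.mk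
          [("emotional_health", pvRow d), ("mental_health", w2), ("dietary_health", w3),
           ("physical_body_health", w4)] by
        simp [PySem.Dict.insert, PySem.Dict.contains]]
      rw [ih hnd' hpre']
      simp [pvSel, PySem.Dict.get?_mk_cons, hnone _ rfl]
    · by_cases h2 : a = "flight_experience"
      · subst h2
        obtain ⟨hs, he, hz⟩ := hpre _ (List.mem_cons_self) (Or.inr (Or.inl rfl))
        rw [pvStepA_mapped _ _ _ _ rfl hs he hz]
        rw [show (PySem.Dict.mk
            [("emotional_health", w1), ("mental_health", w2), ("dietary_health", w3),
             ("physical_body_health", w4)]).insert "mental_health" (pvRow d) = PySem.Dict.mk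
            [("emotional_health", w1), ("mental_health", pvRow d), ("dietary_health", w3),
             ("physical_body_health", w4)] by
          simp [PySem.Dict.insert, PySem.Dict.contains]]
        rw [ih hnd' hpre']
        simp [pvSel, PySem.Dict.get?_mk_cons, hnone _ rfl]
      · by_cases h3 : a = "food_and_drink"
        · subst h3
          obtain ⟨hs, he, hz⟩ := hpre _ (List.mem_cons_self) (Or.inr (Or.inr (Or.inl rfl)))
          rw [pvStepA_mapped _ _ _ _ rfl hs he hz]
          rw [show (PySem.Dict.mk
              [("emotional_health", w1), ("mental_health", w2), ("dietary_health", w3),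
               ("physical_body_health", w4)]).insert "dietary_health" (pvRow d) = PySem.Dict.mk
              [("emotional_health", w1), ("mental_health", w2), ("dietary_health", pvRow d),
               ("physical_body_health", w4)] by
            simp [PySem.Dict.insert, PySem.Dict.contains]]
          rw [ih hnd' hpre']
          simp [pvSel, PySem.Dict.get?_mk_cons, hnone _ rfl]
        · by_cases h4 : a = "seat_comfort"
          · subst h4
            obtain ⟨hs, he, hz⟩ := hpre _ (List.mem_cons_self) (Or.inr (Or.inr (Or.inr rfl)))
            rw [pvStepA_mapped _ _ _ _ rfl hs he hz]
            rw [show (PySem.Dict.mk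
                [("emotional_health", w1), ("mental_health", w2), ("dietary_health", w3),
                 ("physical_body_health", w4)]).insert "physical_body_health" (pvRow d) = PySem.Dict.mk
                [("emotional_health", w1), ("mental_health", w2), ("dietary_health", w3),
                 ("physical_body_health", pvRow d)] by
              simp [PySem.Dict.insert, PySem.Dict.contains]]
            rw [ih hnd' hpre']
            simp [pvSel, PySem.Dict.get?_mk_cons, hnone _ rfl]
          · have f1 : ("service_and_staff" == a) = false := beq_eq_false_iff_ne.mpr (Ne.symm h1)
            have f2 : ("flight_experience" == a) = false := beq_eq_false_iff_ne.mpr (Ne.symm h2)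
            have f3 : ("food_and_drink" == a) = false := beq_eq_false_iff_ne.mpr (Ne.symm h3)
            have f4 : ("seat_comfort" == a) = false := beq_eq_false_iff_ne.mpr (Ne.symm h4)
            have hmn : pvMappingA.get? a = none := by
              simp [pvMappingA, f1, f2, f3, f4, PySem.Dict.get?]
            have hstep : ∀ hr : PySem.Dict String (List (String × String)),
                pvStepA hr (a, d) = hr := by
              intro hr; simp [pvStepA, hmn]
            have g1 : (a == "service_and_staff") = false := beq_eq_false_iff_ne.mpr h1
            have g2 : (a == "flight_experience") = false := beq_eq_false_iff_ne.mpr h2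
            have g3 : (a == "food_and_drink") = false := beq_eq_false_iff_ne.mpr h3
            have g4 : (a == "seat_comfort") = false := beq_eq_false_iff_ne.mpr h4
            rw [hstep, ih hnd' hpre']
            simp [pvSel, PySem.Dict.get?_mk_cons, g1, g2, g3, g4]

theorem pvCell (as : List (String × List (String × String)))
    (hpre : ∀ p ∈ as,
      (p.1 = "service_and_staff" ∨ p.1 = "flight_experience" ∨ p.1 = "food_and_drink" ∨ p.1 = "seat_comfort") →
      (((PySem.Dict.mk p.2).get? "sentiment").isSome ∧
       ((PySem.Dict.mk p.2).get? "emotion").isSome ∧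
       ((PySem.Dict.mk p.2).get? "sentence").isSome))
    (c a : String)
    (ha : a = "service_and_staff" ∨ a = "flight_experience" ∨ a = "food_and_drink" ∨ a = "seat_comfort") :
    [("health_category", c),
     ("impact", (PySem.Dict.mk (pvSel as a [("impact", "neutral"), ("emotion", "neutral"), ("sentence", "")])).getD "impact" ""),
     ("emotion", (PySem.Dict.mk (pvSel as a [("impact", "neutral"), ("emotion", "neutral"), ("sentence", "")])).getD "emotion" ""),
     ("sentence", (PySem.Dict.mk (pvSel as a [("impact", "neutral"), ("emotion", "neutral"), ("sentence", "")])).getD "sentence" "")] =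
    (match (PySem.Dict.mk as).get? a with
     | none =>
       [("health_category", c), ("impact", "neutral"), ("emotion", "neutral"), ("sentence", "")]
     | some data =>
       let dd := PySem.Dict.mk data
       match dd.get? "sentiment", dd.get? "emotion", dd.get? "sentence" with
       | some sentiment, some emotion, some sentence =>
         let impact := if sentiment == "positive" || sentiment == "negative" then sentiment else "neutral"
         [("health_category", c), ("impact", impact), ("emotion", emotion), ("sentence", sentence)]
       | _, _, _ => [("health_category", c)]) := by
  cases hget : (PySem.Dict.mk as).get? a with
  | none =>
    simp only [pvSel, hget]
    simp [PySem.Dict.getD_eq_get?_getD, PySem.Dict.get?]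
  | some data =>
    have hmem : (a, data) ∈ as := by
      simpa using PySem.Dict.mem_items_of_get?_eq_some (d := PySem.Dict.mk as) hget
    obtain ⟨hs, he, hz⟩ := hpre _ hmem ha
    obtain ⟨s, hs⟩ := Option.isSome_iff_exists.mp hs
    obtain ⟨e, he⟩ := Option.isSome_iff_exists.mp he
    obtain ⟨z, hz⟩ := Option.isSome_iff_exists.mp hz
    simp only [pvSel, hget, hs, he, hz]
    simp only [PySem.Dict.get?] at hs he hz
    simp [pvRow, PySem.Dict.getD_eq_get?_getD, PySem.Dict.get?, hs, he, hz]

-- ===== VERDICT (by name: the statement is the Claim_ definition above) =====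
theorem map_aspect_to_health_spec : Claim_equal_map_aspect_to_health := by
  intro as hdom hpre
  obtain ⟨hnd, hkeys⟩ := hpre
  unfold Spec_map_aspect_to_health
  simp only [map_aspect_to_health, pvDefaultResultA]
  rw [pvFold_char as hnd hkeys]
  simp only [map_aspect_to_health_alt, pvCategoriesB, List.map_cons, List.map_nil,
    List.foldl_cons, List.foldl_nil, List.nil_append]
  rw [pvCell as hkeys "emotional_health" "service_and_staff" (Or.inl rfl),
      pvCell as hkeys "mental_health" "flight_experience" (Or.inr (Or.inl rfl)),
      pvCell as hkeys "dietary_health" "food_and_drink" (Or.inr (Or.inr (Or.inl rfl))),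
      pvCell as hkeys "physical_body_health" "seat_comfort" (Or.inr (Or.inr (Or.inr rfl)))]
  simp
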